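-- pv_equiv track=rewrite | github.com/jupyter-jsc/JupyterHub-extended | j4j_spawner/utils.py | juwels_jureca_reservation
-- ===== SOURCE A (Python) =====
-- def juwels_jureca_reservation(name, s, data):
--     li = s.split("ReservationName=")
--     dic = {}
--     ret = {'Account': {}, 'Project': {}}
--     for reservation in li[1:]:
--         lines = reservation.replace("\n", " ")
--         lineList = lines.split()
--         dic[lineList[0]] = {}
--         for pair in lineList[1:]:
--             keyValue = pair.split("=")
--             dic[lineList[0]][keyValue[0]] = keyValue[1]
--     name = name.upper()
--     if name in data.keys():
--         for account in data.get(name).keys():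
--             for reservation, infos in dic.items():
--                 if account in infos.get('Users'):
--                     if account not in ret['Account'].keys():
--                         ret['Account'][account] = {}
--                     ret['Account'][account][reservation] = infos
--             for project in data.get(name).get(account).keys():
--                 for reservation, infos in dic.items():
--                     if project in infos.get('Accounts'):
--                         if project not in ret['Project'].keys():
--                             ret['Project'][project] = {}
--                         ret['Project'][project][reservation] = infos
--     return ret
-- ===== SOURCE B (Python) =====
-- def juwels_jureca_reservation(name, s, data):
--     dic = {}
--     for block in s.split("ReservationName=")[1:]:
--         tokens = block.replace("\n", " ").split()
--         pairs = [p.split("=") for p in tokens[1:]]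
--         dic[tokens[0]] = {kv[0]: kv[1] for kv in pairs}
--     name = name.upper()
--     if name not in data:
--         return {'Account': {}, 'Project': {}}
--     accounts = list(data[name])
--     projects = []
--     for account in accounts:
--         for project in data[name][account]:
--             if project not in projects:
--                 projects.append(project)
--     # transposed loop nest: ONE pass over the reservations fills per-account and
--     # per-project buckets simultaneously; matched maps are emitted afterwards in
--     # account/project order, skipping empty buckets.
--     acc_buckets = {a: {} for a in accounts}
--     proj_buckets = {p: {} for p in projects}
--     for reservation, infos in dic.items():
--         users = infos.get('Users')
--         accs = infos.get('Accounts')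
--         for a in accounts:
--             if a in users:
--                 acc_buckets[a][reservation] = infos
--         for p in projects:
--             if p in accs:
--                 proj_buckets[p][reservation] = infos
--     return {'Account': {a: b for a, b in acc_buckets.items() if b},
--             'Project': {p: b for p, b in proj_buckets.items() if b}}
-- ===== Notes on version B (the rewrite author's own statement) =====
-- stated objective: alternative
-- what changed: B transposes A's loop nest: instead of A's account-outer (and per-account project-outer) rescans of the reservation dict with incremental creation of ret's inner dicts, B pre-computes the deduplicated project list, pre-allocates one empty bucket per account and per distinct project, fills all buckets in a SINGLE pass over the reservations, and finally emits the non-empty buckets in account/project order.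
import Mathlib
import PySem

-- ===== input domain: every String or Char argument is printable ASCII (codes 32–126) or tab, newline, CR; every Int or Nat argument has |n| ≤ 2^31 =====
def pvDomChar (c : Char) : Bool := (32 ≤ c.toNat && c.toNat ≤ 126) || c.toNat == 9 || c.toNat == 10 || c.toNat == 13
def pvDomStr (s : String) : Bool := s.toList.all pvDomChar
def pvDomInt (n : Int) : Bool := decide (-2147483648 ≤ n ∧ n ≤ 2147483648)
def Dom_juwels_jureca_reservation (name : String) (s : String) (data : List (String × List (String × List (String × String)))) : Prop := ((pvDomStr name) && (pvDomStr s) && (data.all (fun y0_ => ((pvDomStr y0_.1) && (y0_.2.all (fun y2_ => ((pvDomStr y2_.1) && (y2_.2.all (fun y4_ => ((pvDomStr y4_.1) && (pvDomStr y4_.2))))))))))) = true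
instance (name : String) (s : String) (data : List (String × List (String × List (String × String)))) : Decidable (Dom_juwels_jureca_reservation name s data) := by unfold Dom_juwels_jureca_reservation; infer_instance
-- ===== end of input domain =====

-- B transposes A's loop nest: A rescans the reservation dict once per account and once per project
-- (projects revisited per account); B pre-allocates one empty bucket per account and per distinct
-- project, fills all buckets in a SINGLE pass over the reservations, and emits the non-empty buckets
-- in account/project order afterwards; same return value (objective: alternative, not speed).

-- ===== PORT A =====
def juwels_jureca_reservation (name : String) (s : String) (data : List (String × List (String × List (String × String)))) : List (String × List (String × List (String × List (String × String)))) :=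
  let li := (PySem.Str.split? s "ReservationName=").getD []
  let dic : PySem.Dict String (PySem.Dict String String) :=
    (PySem.List.slice li (some 1) none).foldl (fun dic reservation =>
      let lines := PySem.Str.replace reservation "\n" " "
      let lineList := PySem.Str.split₀ lines
      let r0 := PySem.List.pyGetD lineList 0 ""
      let dic := dic.insert r0 PySem.Dict.empty
      (PySem.List.slice lineList (some 1) none).foldl (fun dic pair =>
          let keyValue := (PySem.Str.split? pair "=").getD []
          dic.modify r0 PySem.Dict.empty (fun inner =>
            inner.insert (PySem.List.pyGetD keyValue 0 "") (PySem.List.pyGetD keyValue 1 "")))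
        dic)
      PySem.Dict.empty
  let name := PySem.Str.upper name
  let ret : PySem.Dict String (PySem.Dict String (PySem.Dict String (PySem.Dict String String))) :=
    (PySem.Dict.empty.insert "Account" PySem.Dict.empty).insert "Project" PySem.Dict.empty
  let dataD := PySem.Dict.ofList data
  let ret :=
    if dataD.contains name then
      let accD := PySem.Dict.ofList ((dataD.get? name).getD [])
      accD.keys.foldl (fun ret account =>
        let ret := dic.items.foldl (fun ret ri =>
            if PySem.Str.isIn account (ri.2.getD "Users" "") then
              let ret := if (ret.getD "Account" PySem.Dict.empty).contains account then ret
                         else ret.modify "Account" PySem.Dict.empty (fun a => a.insert account PySem.Dict.empty)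
              ret.modify "Account" PySem.Dict.empty (fun a => a.modify account PySem.Dict.empty (fun inner => inner.insert ri.1 ri.2))
            else ret) ret
        (PySem.Dict.ofList (accD.getD account [])).keys.foldl (fun ret project =>
          dic.items.foldl (fun ret ri =>
            if PySem.Str.isIn project (ri.2.getD "Accounts" "") then
              let ret := if (ret.getD "Project" PySem.Dict.empty).contains project then ret
                         else ret.modify "Project" PySem.Dict.empty (fun pm => pm.insert project PySem.Dict.empty)
              ret.modify "Project" PySem.Dict.empty (fun pm => pm.modify project PySem.Dict.empty (fun inner => inner.insert ri.1 ri.2))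
            else ret) ret) ret) ret
    else ret
  ret.items.map (fun kv => (kv.1, kv.2.items.map (fun kv2 => (kv2.1, kv2.2.items.map (fun kv3 => (kv3.1, kv3.2.items))))))

-- ===== PORT B =====
-- Source B's 'acc_buckets[a][reservation] = infos' is ported as Dict.modify with default empty; the key is
-- always present (buckets are pre-allocated for every account/project), so this is exact.
def juwels_jureca_reservation_alt (name : String) (s : String) (data : List (String × List (String × List (String × String)))) : List (String × List (String × List (String × List (String × String)))) :=
  let dic : PySem.Dict String (PySem.Dict String String) :=
    (PySem.List.slice ((PySem.Str.split? s "ReservationName=").getD []) (some 1) none).foldl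
      (fun dic block =>
        let tokens := PySem.Str.split₀ (PySem.Str.replace block "\n" " ")
        let pairs := (PySem.List.slice tokens (some 1) none).map (fun p => (PySem.Str.split? p "=").getD [])
        dic.insert (PySem.List.pyGetD tokens 0 "")
          (pairs.foldl (fun m kv => m.insert (PySem.List.pyGetD kv 0 "") (PySem.List.pyGetD kv 1 "")) PySem.Dict.empty))
      PySem.Dict.empty
  let name := PySem.Str.upper name
  let dataD := PySem.Dict.ofList data
  if (PySem.Dict.contains dataD name) = false then [("Account", []), ("Project", [])]
  else
    let accD := PySem.Dict.ofList ((dataD.get? name).getD [])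
    let accounts := accD.keys
    let projects : List String :=
      accounts.foldl (fun ps account =>
        (PySem.Dict.ofList (accD.getD account [])).keys.foldl
          (fun ps project => if ps.contains project then ps else ps ++ [project]) ps) []
    let accB0 : PySem.Dict String (PySem.Dict String (PySem.Dict String String)) :=
      accounts.foldl (fun d a => d.insert a PySem.Dict.empty) PySem.Dict.empty
    let projB0 : PySem.Dict String (PySem.Dict String (PySem.Dict String String)) :=
      projects.foldl (fun d p => d.insert p PySem.Dict.empty) PySem.Dict.empty
    let filled := dic.items.foldl (fun bp ri =>
        let users := ri.2.getD "Users" ""   -- infos.get('Users'); present on every admitted input (Pre_)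
        let accs := ri.2.getD "Accounts" ""
        (accounts.foldl (fun ab a => if PySem.Str.isIn a users then ab.modify a PySem.Dict.empty (fun inner => inner.insert ri.1 ri.2) else ab) bp.1,
         projects.foldl (fun pb p => if PySem.Str.isIn p accs then pb.modify p PySem.Dict.empty (fun inner => inner.insert ri.1 ri.2) else pb) bp.2))
      (accB0, projB0)
    let accMap := filled.1.items.foldl (fun d kv => if kv.2.size ≠ 0 then d.insert kv.1 kv.2 else d) PySem.Dict.empty
    let projMap := filled.2.items.foldl (fun d kv => if kv.2.size ≠ 0 then d.insert kv.1 kv.2 else d) PySem.Dict.empty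
    [("Account", accMap.items.map (fun kv2 => (kv2.1, kv2.2.items.map (fun kv3 => (kv3.1, kv3.2.items))))),
     ("Project", projMap.items.map (fun kv2 => (kv2.1, kv2.2.items.map (fun kv3 => (kv3.1, kv3.2.items)))))]

-- ===== PRECONDITION & SPEC =====
-- Pre_ excludes exactly the inputs on which Python A raises: a reservation block with no tokens or a
-- "key=value" token without '=' (IndexError), and — when name.upper() is a key of data whose account dict is
-- relevant — a reservation lacking a 'Users' (resp. 'Accounts') field, where A's infos.get(...) returns None
-- and the 'in' test raises TypeError.
def Pre_juwels_jureca_reservation (name : String) (s : String) (data : List (String × List (String × List (String × String)))) : Prop :=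
  (∀ blk ∈ PySem.List.slice ((PySem.Str.split? s "ReservationName=").getD []) (some 1) none,
      PySem.Str.split₀ (PySem.Str.replace blk "\n" " ") ≠ [] ∧
      ∀ t ∈ (PySem.Str.split₀ (PySem.Str.replace blk "\n" " ")).tail, PySem.Str.isIn "=" t = true) ∧
  ((PySem.Dict.ofList data).contains (PySem.Str.upper name) = true →
    ((PySem.Dict.ofList (((PySem.Dict.ofList data).get? (PySem.Str.upper name)).getD [])).keys ≠ [] →
       ∀ blk ∈ PySem.List.slice ((PySem.Str.split? s "ReservationName=").getD []) (some 1) none,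
         ∃ t ∈ (PySem.Str.split₀ (PySem.Str.replace blk "\n" " ")).tail,
           ((PySem.Str.split? t "=").getD []).getD 0 "" = "Users") ∧
    ((∃ a ∈ (PySem.Dict.ofList (((PySem.Dict.ofList data).get? (PySem.Str.upper name)).getD [])).keys,
        (PySem.Dict.ofList ((PySem.Dict.ofList (((PySem.Dict.ofList data).get? (PySem.Str.upper name)).getD [])).getD a [])).keys ≠ []) →
       ∀ blk ∈ PySem.List.slice ((PySem.Str.split? s "ReservationName=").getD []) (some 1) none,
         ∃ t ∈ (PySem.Str.split₀ (PySem.Str.replace blk "\n" " ")).tail,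
           ((PySem.Str.split? t "=").getD []).getD 0 "" = "Accounts"))
instance (name : String) (s : String) (data : List (String × List (String × List (String × String)))) : Decidable (Pre_juwels_jureca_reservation name s data) := by unfold Pre_juwels_jureca_reservation; infer_instance
def pvWitness_juwels_jureca_reservation : String × String × (List (String × List (String × List (String × String)))) :=
  ("demo", "ReservationName=res1 Users=alpha,beta Accounts=projA\n", [("DEMO", [("alpha", [("projA", "x")])])])
def Spec_juwels_jureca_reservation (name : String) (s : String) (data : List (String × List (String × List (String × String)))) (out : List (String × List (String × List (String × List (String × String))))) : Prop := out = juwels_jureca_reservation_alt name s data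
instance (name : String) (s : String) (data : List (String × List (String × List (String × String)))) (out : List (String × List (String × List (String × List (String × String))))) : Decidable (Spec_juwels_jureca_reservation name s data out) := by
  unfold Spec_juwels_jureca_reservation
  haveI h1 : DecidableEq (List (String × String)) := inferInstance
  haveI h2 : DecidableEq (List (String × List (String × String))) := inferInstance
  haveI h3 : DecidableEq (List (String × List (String × List (String × String)))) := inferInstance
  haveI h4 : DecidableEq (List (String × List (String × List (String × List (String × String))))) := inferInstance
  infer_instance

-- ===== CLAIM (what is proved, stated in full; the proofs are below) =====
def Claim_equal_juwels_jureca_reservation : Prop := ∀ (name : String) (s : String) (data : List (String × List (String × List (String × String)))), Dom_juwels_jureca_reservation name s data → Pre_juwels_jureca_reservation name s data → Spec_juwels_jureca_reservation name s data (juwels_jureca_reservation name s data)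

-- ===== LEMMAS AND PROOFS =====

abbrev PvInfo := PySem.Dict String String
abbrev PvMap := PySem.Dict String PvInfo
abbrev PvOut := PySem.Dict String PvMap

-- generic dict facts used by both sides
theorem pv_contains_of_get? {κ ν : Type} [BEq κ] (d : PySem.Dict κ ν) (k : κ) (v : ν)
    (h : d.get? k = some v) : d.contains k = true := by
  rw [PySem.Dict.contains_eq_isSome_get?, h]; rfl

theorem pv_insert_get?_self {κ ν : Type} [BEq κ] [LawfulBEq κ] (d : PySem.Dict κ ν) (k : κ) (v : ν)
    (hn : d.keys.Nodup) (h : d.get? k = some v) : d.insert k v = d := by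
  have hc : d.contains k = true := pv_contains_of_get? d k v h
  apply PySem.Dict.ext
  show (if d.contains k = true then PySem.Dict.mk (List.map (fun p => if (p.1 == k) = true then (k, v) else p) d.items) else PySem.Dict.mk (d.items ++ [(k, v)])).items = d.items
  rw [if_pos hc]
  have : ∀ x ∈ d.items, (if (x.1 == k) = true then (k, v) else x) = x := by
    intro x hx
    by_cases hb : (x.1 == k) = true
    · have hx1 : x.1 = k := eq_of_beq hb
      have hmem : (k, x.2) ∈ d.items := by rw [← hx1]; exact hx
      have hg : d.get? k = some x.2 := PySem.Dict.get?_of_mem_items _ hmem hn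
      rw [h] at hg
      simp only [hb, if_true]
      have hv : v = x.2 := Option.some_injective _ hg
      rw [hv, ← hx1]
    · simp [hb]
  calc List.map (fun p => if (p.1 == k) = true then (k, v) else p) d.items
      = List.map id d.items := List.map_congr_left this
    _ = d.items := List.map_id d.items

theorem pv_modify_of_get? {κ ν : Type} [BEq κ] (d : PySem.Dict κ ν) (k : κ) (v : ν) (e : ν) (f : ν → ν)
    (h : d.get? k = some v) : d.modify k e f = d.insert k (f v) := by
  simp [PySem.Dict.modify, PySem.Dict.getD_eq_get?_getD, h]

theorem pv_modify_insert {κ ν : Type} [BEq κ] [LawfulBEq κ] (d : PySem.Dict κ ν) (k : κ) (v : ν) (e : ν) (f : ν → ν) :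
    (d.insert k v).modify k e f = d.insert k (f v) := by
  rw [pv_modify_of_get? _ k v e f (PySem.Dict.get?_insert_self d k v), PySem.Dict.insert_insert_self]

theorem pv_insert_ne_nil {κ ν : Type} [BEq κ] (d : PySem.Dict κ ν) (k : κ) (v : ν) :
    (d.insert k v).items ≠ [] := by
  by_cases hc : d.contains k = true
  · have : d.items ≠ [] := by
      intro hnil
      rw [PySem.Dict.contains, hnil] at hc
      simp at hc
    simp [PySem.Dict.insert, hc, this]
  · simp [PySem.Dict.insert, hc]

-- parsing: A's create-then-modify loop over one block equals B's single insert of the built inner dict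
theorem pv_blockfold (g0 g1 : String → String) (ts : List String) (d : PvMap) (t0 : String) (m : PvInfo) :
    ts.foldl (fun dic pair => dic.modify t0 PySem.Dict.empty (fun inner => inner.insert (g0 pair) (g1 pair))) (d.insert t0 m)
    = d.insert t0 (ts.foldl (fun m pair => m.insert (g0 pair) (g1 pair)) m) := by
  induction ts generalizing m with
  | nil => rfl
  | cons t ts ih =>
    simp only [List.foldl_cons, pv_modify_insert]
    exact ih (m.insert (g0 t) (g1 t))

-- the two fixed slots of ret
theorem pv_ret_getD_A (a p : PvOut) :
    (PySem.Dict.mk [("Account", a), ("Project", p)]).getD "Account" PySem.Dict.empty = a := by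
  simp [PySem.Dict.getD, PySem.Dict.get?, List.find?]

theorem pv_ret_getD_P (a p : PvOut) :
    (PySem.Dict.mk [("Account", a), ("Project", p)]).getD "Project" PySem.Dict.empty = p := by
  simp [PySem.Dict.getD, PySem.Dict.get?, List.find?]

theorem pv_ret_modA (a p : PvOut) (f : PvOut → PvOut) :
    (PySem.Dict.mk [("Account", a), ("Project", p)]).modify "Account" PySem.Dict.empty f
    = PySem.Dict.mk [("Account", f a), ("Project", p)] := by
  simp [PySem.Dict.modify, PySem.Dict.insert, PySem.Dict.contains, PySem.Dict.getD, PySem.Dict.get?, List.find?, List.any]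

theorem pv_ret_modP (a p : PvOut) (f : PvOut → PvOut) :
    (PySem.Dict.mk [("Account", a), ("Project", p)]).modify "Project" PySem.Dict.empty f
    = PySem.Dict.mk [("Account", a), ("Project", f p)] := by
  simp [PySem.Dict.modify, PySem.Dict.insert, PySem.Dict.contains, PySem.Dict.getD, PySem.Dict.get?, List.find?, List.any]

-- one scan of the reservations for a single account/project, and its collected matches
def pvFill (c : String × PvInfo → Bool) (l : List (String × PvInfo)) (m : PvMap) : PvMap :=
  l.foldl (fun m ri => if c ri then m.insert ri.1 ri.2 else m) m

def pvStep (c : String × PvInfo → Bool) (key : String) (l : List (String × PvInfo)) (d : PvOut) : PvOut :=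
  l.foldl (fun d ri => if c ri then
      (if d.contains key then d else d.insert key PySem.Dict.empty).modify key PySem.Dict.empty
        (fun inner => inner.insert ri.1 ri.2)
    else d) d

def pvRun (c : String → String × PvInfo → Bool) (l : List (String × PvInfo)) (ps : List String) (d : PvOut) : PvOut :=
  ps.foldl (fun d p => pvStep (c p) p l d) d

def pvBRun (c : String → String × PvInfo → Bool) (l : List (String × PvInfo)) (ps : List String) (d : PvOut) : PvOut :=
  ps.foldl (fun d p =>
    let matched := pvFill (c p) l PySem.Dict.empty
    if matched.size ≠ 0 then d.insert p matched else d) d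

def pvGood (c : String → String × PvInfo → Bool) (l : List (String × PvInfo)) (d : PvOut) : Prop :=
  d.keys.Nodup ∧ ∀ q v, d.get? q = some v →
    v = pvFill (c q) l PySem.Dict.empty ∧ (pvFill (c q) l PySem.Dict.empty).size ≠ 0

-- ret-level loops reduce to slot-level loops
theorem pv_decompA (c : String × PvInfo → Bool) (acct : String) (l : List (String × PvInfo)) (a p : PvOut) :
    l.foldl (fun ret ri => if c ri then
        ((if (ret.getD "Account" PySem.Dict.empty).contains acct then ret
          else ret.modify "Account" PySem.Dict.empty (fun x => x.insert acct PySem.Dict.empty)).modify "Account" PySem.Dict.empty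
            (fun x => x.modify acct PySem.Dict.empty (fun inner => inner.insert ri.1 ri.2)))
      else ret) (PySem.Dict.mk [("Account", a), ("Project", p)])
    = PySem.Dict.mk [("Account", pvStep c acct l a), ("Project", p)] := by
  induction l generalizing a with
  | nil => rfl
  | cons ri l ih =>
    simp only [pvStep, List.foldl_cons] at ih ⊢
    by_cases hc : c ri = true
    · simp only [hc, if_true, pv_ret_getD_A]
      by_cases ha : a.contains acct = true
      · simp only [ha, if_true, pv_ret_modA]; exact ih _
      · simp only [ha, if_false, Bool.false_eq_true, pv_ret_modA]; exact ih _
    · simp only [hc, Bool.false_eq_true, if_false]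
      exact ih _

theorem pv_decompP (c : String × PvInfo → Bool) (proj : String) (l : List (String × PvInfo)) (a p : PvOut) :
    l.foldl (fun ret ri => if c ri then
        ((if (ret.getD "Project" PySem.Dict.empty).contains proj then ret
          else ret.modify "Project" PySem.Dict.empty (fun x => x.insert proj PySem.Dict.empty)).modify "Project" PySem.Dict.empty
            (fun x => x.modify proj PySem.Dict.empty (fun inner => inner.insert ri.1 ri.2)))
      else ret) (PySem.Dict.mk [("Account", a), ("Project", p)])
    = PySem.Dict.mk [("Account", a), ("Project", pvStep c proj l p)] := by
  induction l generalizing p with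
  | nil => rfl
  | cons ri l ih =>
    simp only [pvStep, List.foldl_cons] at ih ⊢
    by_cases hc : c ri = true
    · simp only [hc, if_true, pv_ret_getD_P]
      by_cases hp : p.contains proj = true
      · simp only [hp, if_true, pv_ret_modP]; exact ih _
      · simp only [hp, if_false, Bool.false_eq_true, pv_ret_modP]; exact ih _
    · simp only [hc, Bool.false_eq_true, if_false]
      exact ih _

-- filling facts
theorem pv_fill_ne_nil (c : String × PvInfo → Bool) (l : List (String × PvInfo)) (m : PvMap)
    (h : m.items ≠ []) : (pvFill c l m).items ≠ [] := by
  induction l generalizing m with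
  | nil => exact h
  | cons ri l ih =>
    simp only [pvFill, List.foldl_cons]
    by_cases hc : c ri = true
    · simp only [hc, if_true]
      exact ih _ (pv_insert_ne_nil m ri.1 ri.2)
    · simp only [hc, Bool.false_eq_true, if_false]
      exact ih _ h

theorem pv_fill_items (c : String × PvInfo → Bool) (l : List (String × PvInfo))
    (hnd : (l.map Prod.fst).Nodup) : (pvFill c l PySem.Dict.empty).items = l.filter c := by
  have h1 : pvFill c l PySem.Dict.empty = (l.filter c).foldl (fun m ri => m.insert ri.1 ri.2) PySem.Dict.empty :=
    PySem.List.foldl_if_eq_foldl_filter c _ l PySem.Dict.empty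
  have h2 := PySem.Dict.items_foldl_insert_fresh (l := l.filter c) (k := Prod.fst) (v := Prod.snd)
    (d := PySem.Dict.empty) (fun a _ => PySem.Dict.contains_empty a.1)
    (List.Nodup.sublist (List.Sublist.map Prod.fst List.filter_sublist) hnd)
  rw [h1]
  simpa using h2

theorem pv_fill_noop (c : String × PvInfo → Bool) (l : List (String × PvInfo)) (m : PvMap)
    (hn : m.keys.Nodup) (h : ∀ ri ∈ l, c ri = true → m.get? ri.1 = some ri.2) : pvFill c l m = m := by
  induction l with
  | nil => rfl
  | cons ri l ih =>
    simp only [pvFill, List.foldl_cons]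
    by_cases hc : c ri = true
    · simp only [hc, if_true]
      rw [pv_insert_get?_self m ri.1 ri.2 hn (h ri (by simp) hc)]
      exact ih (fun x hx hcx => h x (by simp [hx]) hcx)
    · simp only [hc, Bool.false_eq_true, if_false]
      exact ih (fun x hx hcx => h x (by simp [hx]) hcx)

theorem pv_fill_self (c : String × PvInfo → Bool) (l : List (String × PvInfo))
    (hnd : (l.map Prod.fst).Nodup) :
    pvFill c l (pvFill c l PySem.Dict.empty) = pvFill c l PySem.Dict.empty := by
  have hit := pv_fill_items c l hnd
  have hkn : (pvFill c l PySem.Dict.empty).keys.Nodup := by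
    show ((pvFill c l PySem.Dict.empty).items.map Prod.fst).Nodup
    rw [hit]
    exact List.Nodup.sublist (List.Sublist.map Prod.fst List.filter_sublist) hnd
  apply pv_fill_noop _ _ _ hkn
  intro ri hri hc
  apply PySem.Dict.get?_of_mem_items _ _ hkn
  rw [hit]
  exact List.mem_filter.mpr ⟨hri, hc⟩

-- one pvStep, characterised
theorem pv_step_from (c : String × PvInfo → Bool) (key : String) (l : List (String × PvInfo)) (d : PvOut)
    (inner : PvMap) (hn : d.keys.Nodup) (h : d.get? key = some inner) :
    pvStep c key l d = d.insert key (pvFill c l inner) := by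
  induction l generalizing d inner with
  | nil => exact (pv_insert_get?_self d key inner hn h).symm
  | cons ri l ih =>
    simp only [pvStep, pvFill, List.foldl_cons] at ih ⊢
    by_cases hc : c ri = true
    · simp only [hc, if_true, pv_contains_of_get? d key inner h]
      rw [pv_modify_of_get? d key inner _ _ h]
      rw [ih (d.insert key (inner.insert ri.1 ri.2)) (inner.insert ri.1 ri.2)
        (PySem.Dict.nodup_keys_insert d key _ hn) (PySem.Dict.get?_insert_self d key _)]
      rw [PySem.Dict.insert_insert_self]
    · simp only [hc, Bool.false_eq_true, if_false]
      exact ih d inner hn h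

theorem pv_step_fresh (c : String × PvInfo → Bool) (key : String) (l : List (String × PvInfo)) (d : PvOut)
    (hn : d.keys.Nodup) (h : d.contains key = false) :
    pvStep c key l d = if (pvFill c l PySem.Dict.empty).size = 0 then d
      else d.insert key (pvFill c l PySem.Dict.empty) := by
  induction l generalizing d with
  | nil => rfl
  | cons ri l ih =>
    by_cases hc : c ri = true
    · have hner : (pvFill c l (PySem.Dict.empty.insert ri.1 ri.2)).items ≠ [] :=
        pv_fill_ne_nil c l _ (pv_insert_ne_nil _ ri.1 ri.2)
      have hsz : (pvFill c (ri :: l) PySem.Dict.empty).size ≠ 0 := by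
        show (pvFill c (ri :: l) PySem.Dict.empty).items.length ≠ 0
        simp only [pvFill, List.foldl_cons, hc, if_true]
        simpa [List.length_eq_zero_iff] using hner
      rw [if_neg hsz]
      simp only [pvStep, List.foldl_cons, hc, if_true, h, Bool.false_eq_true, if_false]
      rw [pv_modify_insert d key PySem.Dict.empty _ _]
      have := pv_step_from c key l (d.insert key (PySem.Dict.empty.insert ri.1 ri.2))
        (PySem.Dict.empty.insert ri.1 ri.2) (PySem.Dict.nodup_keys_insert d key _ hn)
        (PySem.Dict.get?_insert_self d key _)
      simp only [pvStep] at this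
      rw [this, PySem.Dict.insert_insert_self]
      simp [pvFill, hc]
    · have hfill : pvFill c (ri :: l) PySem.Dict.empty = pvFill c l PySem.Dict.empty := by
        simp only [pvFill, List.foldl_cons, hc, Bool.false_eq_true, if_false]
      rw [show pvStep c key (ri :: l) d = pvStep c key l d by
            simp only [pvStep, List.foldl_cons, hc, Bool.false_eq_true, if_false], hfill]
      exact ih d hn h

theorem pv_step_good (c : String → String × PvInfo → Bool) (l : List (String × PvInfo))
    (hnd : (l.map Prod.fst).Nodup) (p : String) (d : PvOut) (hG : pvGood c l d) :
    pvStep (c p) p l d = if d.contains p then d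
      else if (pvFill (c p) l PySem.Dict.empty).size = 0 then d
      else d.insert p (pvFill (c p) l PySem.Dict.empty) := by
  obtain ⟨hkn, hg⟩ := hG
  by_cases hcp : d.contains p = true
  · rw [if_pos hcp]
    obtain ⟨v, hv⟩ : ∃ v, d.get? p = some v := by
      rw [PySem.Dict.contains_eq_isSome_get?] at hcp
      exact Option.isSome_iff_exists.mp hcp
    obtain ⟨hvM, _⟩ := hg p v hv
    rw [pv_step_from (c p) p l d v hkn hv, hvM, pv_fill_self (c p) l hnd]
    exact pv_insert_get?_self d p _ hkn (hvM ▸ hv)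
  · rw [if_neg hcp]
    exact pv_step_fresh (c p) p l d hkn (Bool.not_eq_true _ ▸ eq_false_of_ne_true hcp)

theorem pv_good_step (c : String → String × PvInfo → Bool) (l : List (String × PvInfo))
    (hnd : (l.map Prod.fst).Nodup) (p : String) (d : PvOut) (hG : pvGood c l d) :
    pvGood c l (pvStep (c p) p l d) := by
  obtain ⟨hkn, hg⟩ := hG
  rw [pv_step_good c l hnd p d ⟨hkn, hg⟩]
  split_ifs with h1 h2
  · exact ⟨hkn, hg⟩
  · exact ⟨hkn, hg⟩
  · refine ⟨PySem.Dict.nodup_keys_insert d p _ hkn, ?_⟩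
    intro q v hq
    rw [PySem.Dict.get?_insert] at hq
    by_cases hqp : q = p
    · subst hqp
      rw [if_pos rfl] at hq
      exact ⟨(Option.some_injective _ hq).symm, h2⟩
    · rw [if_neg hqp] at hq
      exact hg q v hq

theorem pv_step_contains_mono (c : String × PvInfo → Bool) (key q : String) (l : List (String × PvInfo))
    (d : PvOut) (h : d.contains q = true) : (pvStep c key l d).contains q = true := by
  induction l generalizing d with
  | nil => exact h
  | cons ri l ih =>
    simp only [pvStep, List.foldl_cons] at ih ⊢
    by_cases hc : c ri = true
    · simp only [hc, if_true]
      apply ih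
      simp only [PySem.Dict.modify]
      rw [PySem.Dict.contains_insert]
      by_cases hk : d.contains key = true
      · simp [hk, h]
      · simp only [hk, Bool.false_eq_true, if_false]
        rw [PySem.Dict.contains_insert, h]
        simp
    · simp only [hc, Bool.false_eq_true, if_false]
      exact ih d h

-- duplicate projects are no-ops: fold over a list equals fold over its first-occurrence dedup
def pvDedup : List String → List String
  | [] => []
  | p :: l => p :: pvDedup (l.filter (fun x => x != p))
termination_by l => l.length
decreasing_by simp; exact List.length_filter_le _ _

theorem pv_dedup_rec (motive : List String → Prop) (h0 : motive [])
    (h1 : ∀ p l, motive (l.filter (fun x => x != p)) → motive (p :: l)) : ∀ l, motive l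
  | [] => h0
  | p :: l => h1 p l (pv_dedup_rec motive h0 h1 (l.filter (fun x => x != p)))
termination_by l => l.length
decreasing_by simp; exact List.length_filter_le _ _

theorem pv_mem_dedup (l : List String) (x : String) (h : x ∈ pvDedup l) : x ∈ l := by
  revert x h
  induction l using pv_dedup_rec with
  | h0 => intro x h; simp [pvDedup] at h
  | h1 p l ih =>
    intro x h
    rw [pvDedup] at h
    rcases List.mem_cons.mp h with h1 | h2
    · simp [h1]
    · exact List.mem_cons.mpr (Or.inr (List.mem_of_mem_filter (ih x h2)))

theorem pv_nodup_dedup (l : List String) : (pvDedup l).Nodup := by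
  induction l using pv_dedup_rec with
  | h0 => simp [pvDedup]
  | h1 p l ih =>
    rw [pvDedup]
    refine List.nodup_cons.mpr ⟨?_, ih⟩
    intro hmem
    have := List.mem_filter.mp (pv_mem_dedup _ _ hmem)
    simp at this

theorem pv_skip (c : String → String × PvInfo → Bool) (l : List (String × PvInfo))
    (hnd : (l.map Prod.fst).Nodup) (p : String) :
    ∀ (ps : List String) (d : PvOut), pvGood c l d →
      (d.contains p = true ∨ (pvFill (c p) l PySem.Dict.empty).size = 0) →
      pvRun c l ps d = pvRun c l (ps.filter (fun x => x != p)) d := by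
  intro ps
  induction ps with
  | nil => intro d _ _; rfl
  | cons q ps ih =>
    intro d hG hD
    by_cases hqp : q = p
    · subst hqp
      have hstep : pvStep (c q) q l d = d := by
        rw [pv_step_good c l hnd q d hG]
        rcases hD with h1 | h1
        · rw [if_pos h1]
        · by_cases h2 : d.contains q = true
          · rw [if_pos h2]
          · rw [if_neg h2, if_pos h1]
      have hf : (q :: ps).filter (fun x => x != q) = ps.filter (fun x => x != q) := by simp
      rw [hf]
      calc pvRun c l (q :: ps) d = pvRun c l ps (pvStep (c q) q l d) := rfl
        _ = pvRun c l ps d := by rw [hstep]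
        _ = pvRun c l (ps.filter (fun x => x != q)) d := ih d hG hD
    · have hf : (q :: ps).filter (fun x => x != p) = q :: ps.filter (fun x => x != p) := by
        simp [hqp]
      rw [hf]
      show pvRun c l ps (pvStep (c q) q l d) = pvRun c l (ps.filter (fun x => x != p)) (pvStep (c q) q l d)
      apply ih
      · exact pv_good_step c l hnd q d hG
      · rcases hD with h1 | h1
        · exact Or.inl (pv_step_contains_mono (c q) q p l d h1)
        · exact Or.inr h1

theorem pv_run_dedup (c : String → String × PvInfo → Bool) (l : List (String × PvInfo))
    (hnd : (l.map Prod.fst).Nodup) :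
    ∀ (ps : List String) (d : PvOut), pvGood c l d → pvRun c l ps d = pvRun c l (pvDedup ps) d := by
  intro ps
  induction ps using pv_dedup_rec with
  | h0 => intro d _; rw [show pvDedup [] = [] from by rw [pvDedup]]
  | h1 p ps ih =>
    intro d hG
    rw [pvDedup]
    show pvRun c l ps (pvStep (c p) p l d)
      = pvRun c l (pvDedup (ps.filter (fun x => x != p))) (pvStep (c p) p l d)
    have hG' := pv_good_step c l hnd p d hG
    have hD : (pvStep (c p) p l d).contains p = true ∨ (pvFill (c p) l PySem.Dict.empty).size = 0 := by
      rw [pv_step_good c l hnd p d hG]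
      by_cases h1 : d.contains p = true
      · rw [if_pos h1]; exact Or.inl h1
      · rw [if_neg h1]
        by_cases h2 : (pvFill (c p) l PySem.Dict.empty).size = 0
        · exact Or.inr h2
        · rw [if_neg h2]
          left; rw [PySem.Dict.contains_insert]; simp
    rw [pv_skip c l hnd p ps _ hG' hD]
    exact ih _ hG'

theorem pv_run_eq_B (c : String → String × PvInfo → Bool) (l : List (String × PvInfo))
    (hnd : (l.map Prod.fst).Nodup) :
    ∀ (ps : List String) (d : PvOut), pvGood c l d → (∀ p ∈ ps, d.contains p = false) → ps.Nodup →
      pvRun c l ps d = pvBRun c l ps d := by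
  intro ps
  induction ps with
  | nil => intro d _ _ _; rfl
  | cons p ps ih =>
    intro d hG hfresh hnodup
    have hp : d.contains p = false := hfresh p (by simp)
    have hstep := pv_step_good c l hnd p d hG
    rw [if_neg (by simp [hp])] at hstep
    have hgs := pv_good_step c l hnd p d hG
    show pvRun c l ps (pvStep (c p) p l d) = pvBRun c l ps
      (if (pvFill (c p) l PySem.Dict.empty).size ≠ 0 then d.insert p (pvFill (c p) l PySem.Dict.empty) else d)
    by_cases hz : (pvFill (c p) l PySem.Dict.empty).size = 0
    · rw [if_pos hz] at hstep
      rw [hstep, if_neg (by simp [hz])]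
      exact ih d hG (fun q hq => hfresh q (by simp [hq])) (List.Nodup.of_cons hnodup)
    · rw [if_neg hz] at hstep
      rw [hstep, if_pos hz]
      rw [hstep] at hgs
      apply ih _ hgs
      · intro q hq
        rw [PySem.Dict.contains_insert]
        have hqp : q ≠ p := by
          intro hEq; subst hEq
          exact (List.nodup_cons.mp hnodup).1 hq
        simp [hqp, hfresh q (by simp [hq])]
      · exact List.Nodup.of_cons hnodup

theorem pv_good_empty (c : String → String × PvInfo → Bool) (l : List (String × PvInfo)) :
    pvGood c l PySem.Dict.empty := by
  constructor
  · simp [PySem.Dict.keys, PySem.Dict.empty]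
  · intro q v h; simp [PySem.Dict.get?, PySem.Dict.empty] at h

-- nested loops over a list of lists are one loop over the flattened list
theorem pv_foldl_flatMap {α β γ : Type} (L : List α) (g : α → List β) (f : γ → β → γ) (init : γ) :
    L.foldl (fun acc a => (g a).foldl f acc) init = (L.flatMap g).foldl f init := by
  induction L generalizing init with
  | nil => rfl
  | cons a L ih => simp only [List.foldl_cons, List.flatMap_cons, List.foldl_append]; exact ih _

-- B's seen-list loop computes pvDedup
theorem pv_seen_eq_dedup (ps : List String) :
    ∀ acc : List String,
      ps.foldl (fun acc x => if acc.contains x then acc else acc ++ [x]) acc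
      = acc ++ pvDedup (ps.filter (fun x => !acc.contains x)) := by
  induction ps with
  | nil => intro acc; simp [pvDedup]
  | cons x ps ih =>
    intro acc
    show List.foldl _ (if acc.contains x then acc else acc ++ [x]) ps = _
    by_cases hx : acc.contains x = true
    · rw [if_pos hx, ih acc]
      congr 2
      have hxm : x ∈ acc := by simpa using hx
      simp [hxm]
    · have hxm : x ∉ acc := by simpa using hx
      rw [if_neg (by exact hx), ih (acc ++ [x])]
      have hfeq : ps.filter (fun y => !(acc ++ [x]).contains y)
          = (ps.filter (fun y => !acc.contains y)).filter (fun y => y != x) := by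
        rw [List.filter_filter]
        apply List.filter_congr
        intro y _
        simp only [List.contains_append, Bool.not_or, bne, beq_eq_decide]
        simp [Bool.and_comm]
      rw [hfeq]
      rw [show (x :: ps).filter (fun y => !acc.contains y) = x :: ps.filter (fun y => !acc.contains y) by
            simp [hxm]]
      rw [pvDedup]
      simp

theorem pv_decompP_run (c : String → String × PvInfo → Bool) (l : List (String × PvInfo)) :
    ∀ (projs : List String) (a p : PvOut),
    projs.foldl (fun ret project =>
      l.foldl (fun ret ri => if c project ri then
          ((if (ret.getD "Project" PySem.Dict.empty).contains project then ret
            else ret.modify "Project" PySem.Dict.empty (fun x => x.insert project PySem.Dict.empty)).modify "Project" PySem.Dict.empty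
              (fun x => x.modify project PySem.Dict.empty (fun inner => inner.insert ri.1 ri.2)))
        else ret) ret) (PySem.Dict.mk [("Account", a), ("Project", p)])
    = PySem.Dict.mk [("Account", a), ("Project", pvRun c l projs p)] := by
  intro projs
  induction projs with
  | nil => intro a p; rfl
  | cons q projs ih =>
    intro a p
    simp only [List.foldl_cons]
    rw [pv_decompP (c q) q l a p]
    exact ih a _

theorem pv_decomp_main (l : List (String × PvInfo)) (cU cP : String → String × PvInfo → Bool)
    (g : String → List String) :
    ∀ (accts : List String) (a p : PvOut),
    accts.foldl (fun ret account =>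
      (g account).foldl (fun ret project =>
        l.foldl (fun ret ri => if cP project ri then
            ((if (ret.getD "Project" PySem.Dict.empty).contains project then ret
              else ret.modify "Project" PySem.Dict.empty (fun x => x.insert project PySem.Dict.empty)).modify "Project" PySem.Dict.empty
                (fun x => x.modify project PySem.Dict.empty (fun inner => inner.insert ri.1 ri.2)))
          else ret) ret)
      (l.foldl (fun ret ri => if cU account ri then
            ((if (ret.getD "Account" PySem.Dict.empty).contains account then ret
              else ret.modify "Account" PySem.Dict.empty (fun x => x.insert account PySem.Dict.empty)).modify "Account" PySem.Dict.empty
                (fun x => x.modify account PySem.Dict.empty (fun inner => inner.insert ri.1 ri.2)))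
          else ret) ret))
      (PySem.Dict.mk [("Account", a), ("Project", p)])
    = PySem.Dict.mk [("Account", pvRun cU l accts a),
        ("Project", accts.foldl (fun d acct => pvRun cP l (g acct) d) p)] := by
  intro accts
  induction accts with
  | nil => intro a p; rfl
  | cons acct accts ih =>
    intro a p
    simp only [List.foldl_cons]
    rw [pv_decompA (cU acct) acct l a p, pv_decompP_run cP l (g acct) _ _]
    exact ih _ _

theorem pv_parse_eq (s : String) :
    (PySem.List.slice ((PySem.Str.split? s "ReservationName=").getD []) (some 1) none).foldl (fun dic reservation =>
        (PySem.List.slice (PySem.Str.split₀ (PySem.Str.replace reservation "\n" " ")) (some 1) none).foldl (fun dic pair =>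
            dic.modify (PySem.List.pyGetD (PySem.Str.split₀ (PySem.Str.replace reservation "\n" " ")) 0 "") PySem.Dict.empty
              (fun inner => inner.insert (PySem.List.pyGetD ((PySem.Str.split? pair "=").getD []) 0 "")
                (PySem.List.pyGetD ((PySem.Str.split? pair "=").getD []) 1 "")))
          (dic.insert (PySem.List.pyGetD (PySem.Str.split₀ (PySem.Str.replace reservation "\n" " ")) 0 "") PySem.Dict.empty))
      PySem.Dict.empty
    = (PySem.List.slice ((PySem.Str.split? s "ReservationName=").getD []) (some 1) none).foldl (fun dic block =>
        dic.insert (PySem.List.pyGetD (PySem.Str.split₀ (PySem.Str.replace block "\n" " ")) 0 "")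
          (((PySem.List.slice (PySem.Str.split₀ (PySem.Str.replace block "\n" " ")) (some 1) none).map
              (fun p => (PySem.Str.split? p "=").getD [])).foldl
            (fun m kv => m.insert (PySem.List.pyGetD kv 0 "") (PySem.List.pyGetD kv 1 "")) PySem.Dict.empty))
      PySem.Dict.empty := by
  apply PySem.List.foldl_congr_mem
  intro dic blk _
  rw [List.foldl_map]
  exact pv_blockfold (fun pair => PySem.List.pyGetD ((PySem.Str.split? pair "=").getD []) 0 "")
    (fun pair => PySem.List.pyGetD ((PySem.Str.split? pair "=").getD []) 1 "") _ dic _ PySem.Dict.empty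

-- ===== bucket lemmas for B (pre-allocated buckets, one pass over the reservations) =====

theorem pv_prod_fold {α β γ : Type} (l : List γ) (f : α → γ → α) (g : β → γ → β) (a : α) (b : β) :
    l.foldl (fun bp ri => (f bp.1 ri, g bp.2 ri)) (a, b) = (l.foldl f a, l.foldl g b) := by
  induction l generalizing a b with
  | nil => rfl
  | cons ri l ih => exact ih (f a ri) (g b ri)

theorem pv_get?_mk_map (ps : List String) (g : String → PvMap) (a : String) (ha : a ∈ ps) :
    (PySem.Dict.mk (ps.map (fun p => (p, g p)))).get? a = some (g a) := by
  induction ps with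
  | nil => cases ha
  | cons q ps ih =>
    rw [List.map_cons, PySem.Dict.get?_mk_cons]
    by_cases hq : q = a
    · subst hq; simp
    · rw [if_neg (by simpa using hq)]
      rcases List.mem_cons.mp ha with h | h
      · exact absurd h.symm hq
      · exact ih h

theorem pv_insert_mk_map (ps : List String) (g : String → PvMap) (a : String) (v : PvMap) (ha : a ∈ ps) :
    (PySem.Dict.mk (ps.map (fun p => (p, g p)))).insert a v
    = PySem.Dict.mk (ps.map (fun p => (p, if p = a then v else g p))) := by
  have hc : (PySem.Dict.mk (ps.map (fun p => (p, g p)))).contains a = true :=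
    pv_contains_of_get? _ a (g a) (pv_get?_mk_map ps g a ha)
  apply PySem.Dict.ext
  rw [PySem.Dict.items_insert, if_pos hc]
  show (ps.map (fun p => (p, g p))).map (fun p => if p.1 == a then (a, v) else p)
      = ps.map fun p => (p, if p = a then v else g p)
  rw [List.map_map]
  apply List.map_congr_left
  intro p _
  by_cases hp : p = a
  · subst hp; simp
  · simp [hp]

theorem pv_modify_mk_map (ps : List String) (g : String → PvMap) (a : String) (f : PvMap → PvMap) (ha : a ∈ ps) :
    (PySem.Dict.mk (ps.map (fun p => (p, g p)))).modify a PySem.Dict.empty f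
    = PySem.Dict.mk (ps.map (fun p => (p, if p = a then f (g p) else g p))) := by
  rw [pv_modify_of_get? _ a (g a) _ f (pv_get?_mk_map ps g a ha), pv_insert_mk_map ps g a (f (g a)) ha]
  apply PySem.Dict.ext
  show ps.map _ = ps.map _
  apply List.map_congr_left
  intro p _
  by_cases hp : p = a
  · subst hp; simp
  · simp [hp]

theorem pv_upd_mk (c : String → Bool) (f : PvMap → PvMap) (ps : List String) :
    ∀ (qs : List String), qs.Nodup → (∀ a ∈ qs, a ∈ ps) → ∀ g : String → PvMap,
    qs.foldl (fun d a => if c a then d.modify a PySem.Dict.empty f else d)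
        (PySem.Dict.mk (ps.map (fun p => (p, g p))))
    = PySem.Dict.mk (ps.map (fun p => (p, if qs.contains p && c p then f (g p) else g p))) := by
  intro qs
  induction qs with
  | nil => intro _ _ g; simp
  | cons a qs ih =>
    intro hnd hsub g
    rw [List.foldl_cons]
    by_cases hca : c a = true
    · rw [if_pos hca, pv_modify_mk_map ps g a f (hsub a (by simp))]
      rw [ih (List.Nodup.of_cons hnd) (fun x hx => hsub x (by simp [hx])) _]
      apply PySem.Dict.ext
      show ps.map _ = ps.map _
      apply List.map_congr_left
      intro p _
      by_cases hpa : p = a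
      · subst hpa
        have hnp : p ∉ qs := (List.nodup_cons.mp hnd).1
        simp [hnp, hca]
      · simp [hpa]
    · rw [if_neg (by simp [hca])]
      rw [ih (List.Nodup.of_cons hnd) (fun x hx => hsub x (by simp [hx])) g]
      apply PySem.Dict.ext
      show ps.map _ = ps.map _
      apply List.map_congr_left
      intro p _
      by_cases hpa : p = a
      · subst hpa; simp [hca]
      · simp [hpa]

def pvCU : String → String × PvInfo → Bool := fun a ri => PySem.Str.isIn a (ri.2.getD "Users" "")
def pvCP : String → String × PvInfo → Bool := fun p ri => PySem.Str.isIn p (ri.2.getD "Accounts" "")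
def pvSeen (accD : PySem.Dict String (List (String × String))) : List String :=
  List.foldl (fun ps account =>
    List.foldl (fun ps project => if ps.contains project = true then ps else ps ++ [project]) ps
      (PySem.Dict.ofList (accD.getD account [])).keys) [] accD.keys
def pvInitB (ps : List String) : PvOut :=
  List.foldl (fun d a => d.insert a PySem.Dict.empty) PySem.Dict.empty ps
def pvUpdF (c : String → String × PvInfo → Bool) (ps : List String) : PvOut → (String × PvInfo) → PvOut :=
  fun d ri => List.foldl (fun ab a => if c a ri then ab.modify a PySem.Dict.empty
    (fun inner => inner.insert ri.1 ri.2) else ab) d ps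
def pvEmit (d : PvOut) : PvOut :=
  List.foldl (fun d kv => if kv.2.size ≠ 0 then d.insert kv.1 kv.2 else d) PySem.Dict.empty d.items

theorem pv_fill_mk (c : String → String × PvInfo → Bool) (ps : List String) (hnd : ps.Nodup) :
    ∀ (l : List (String × PvInfo)) (g : String → PvMap),
    l.foldl (pvUpdF c ps) (PySem.Dict.mk (ps.map (fun p => (p, g p))))
    = PySem.Dict.mk (ps.map (fun p => (p, pvFill (c p) l (g p)))) := by
  intro l
  induction l with
  | nil =>
    intro g
    simp only [List.foldl_nil]
    apply PySem.Dict.ext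
    show ps.map _ = ps.map _
    apply List.map_congr_left
    intro p _
    simp [pvFill]
  | cons ri l ih =>
    intro g
    rw [List.foldl_cons]
    have hstep : pvUpdF c ps (PySem.Dict.mk (ps.map (fun p => (p, g p)))) ri
        = PySem.Dict.mk (ps.map (fun p => (p, if ps.contains p && c p ri then (g p).insert ri.1 ri.2 else g p))) :=
      pv_upd_mk (fun a => c a ri) (fun inner => inner.insert ri.1 ri.2) ps ps hnd (fun _ h => h) g
    rw [hstep, ih _]
    apply PySem.Dict.ext
    show ps.map _ = ps.map _
    apply List.map_congr_left
    intro p hp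
    simp [pvFill, hp]

theorem pv_init_mk (ps : List String) (hnd : ps.Nodup) :
    ps.foldl (fun d a => d.insert a PySem.Dict.empty) PySem.Dict.empty
    = PySem.Dict.mk (ps.map (fun p => (p, (PySem.Dict.empty : PvMap)))) := by
  apply PySem.Dict.ext
  have h := PySem.Dict.items_foldl_insert_fresh (l := ps) (k := fun a => a)
    (v := fun _ => (PySem.Dict.empty : PvMap)) (d := PySem.Dict.empty)
    (fun a _ => PySem.Dict.contains_empty a) (by simpa using hnd)
  simpa using h

theorem pv_buckets_run (c : String → String × PvInfo → Bool) (l : List (String × PvInfo))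
    (ps : List String) (hnd : ps.Nodup) :
    pvEmit (List.foldl (pvUpdF c ps) (pvInitB ps) l) = pvBRun c l ps PySem.Dict.empty := by
  simp only [pvEmit, pvInitB]
  rw [pv_init_mk ps hnd, pv_fill_mk c ps hnd l (fun _ => PySem.Dict.empty)]
  show (ps.map (fun p => (p, pvFill (c p) l PySem.Dict.empty))).foldl
      (fun d kv => if kv.2.size ≠ 0 then d.insert kv.1 kv.2 else d) PySem.Dict.empty = _
  rw [List.foldl_map]
  rfl

theorem pv_main_pos (l : List (String × PvInfo)) (hnd : (l.map Prod.fst).Nodup)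
    (accD : PySem.Dict String (List (String × String))) (hks : accD.keys.Nodup) :
    List.map (fun kv => (kv.1, List.map (fun kv2 => (kv2.1, List.map (fun kv3 => (kv3.1, kv3.2.items)) kv2.2.items)) kv.2.items))
      (List.foldl (fun ret account =>
        List.foldl (fun ret project =>
          List.foldl (fun ret ri =>
            if PySem.Str.isIn project (ri.2.getD "Accounts" "") = true then
              (if (ret.getD "Project" PySem.Dict.empty).contains project = true then ret
               else ret.modify "Project" PySem.Dict.empty fun pm => pm.insert project PySem.Dict.empty).modify "Project" PySem.Dict.empty
                 fun pm => pm.modify project PySem.Dict.empty fun inner => inner.insert ri.1 ri.2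
            else ret) ret l)
          (List.foldl (fun ret ri =>
            if PySem.Str.isIn account (ri.2.getD "Users" "") = true then
              (if (ret.getD "Account" PySem.Dict.empty).contains account = true then ret
               else ret.modify "Account" PySem.Dict.empty fun a => a.insert account PySem.Dict.empty).modify "Account" PySem.Dict.empty
                 fun a => a.modify account PySem.Dict.empty fun inner => inner.insert ri.1 ri.2
            else ret) ret l)
          (PySem.Dict.ofList (accD.getD account [])).keys)
        (PySem.Dict.mk [("Account", PySem.Dict.empty), ("Project", PySem.Dict.empty)]) accD.keys).items
    = [("Account",
          List.map (fun kv2 => (kv2.1, List.map (fun kv3 => (kv3.1, kv3.2.items)) kv2.2.items))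
            (pvBRun (fun account ri => PySem.Str.isIn account (ri.2.getD "Users" "")) l accD.keys PySem.Dict.empty).items),
       ("Project",
          List.map (fun kv2 => (kv2.1, List.map (fun kv3 => (kv3.1, kv3.2.items)) kv2.2.items))
            (pvBRun (fun project ri => PySem.Str.isIn project (ri.2.getD "Accounts" "")) l
              (List.foldl (fun ps account =>
                List.foldl (fun ps project => if ps.contains project = true then ps else ps ++ [project]) ps
                  (PySem.Dict.ofList (accD.getD account [])).keys) [] accD.keys) PySem.Dict.empty).items)] := by
  rw [pv_decomp_main l (fun account ri => PySem.Str.isIn account (ri.2.getD "Users" ""))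
      (fun project ri => PySem.Str.isIn project (ri.2.getD "Accounts" ""))
      (fun account => (PySem.Dict.ofList (accD.getD account [])).keys) accD.keys PySem.Dict.empty PySem.Dict.empty]
  rw [pv_run_eq_B _ l hnd accD.keys PySem.Dict.empty (pv_good_empty _ _)
      (fun p _ => PySem.Dict.contains_empty p) hks]
  have hflat : List.foldl (fun d acct => pvRun (fun project ri => PySem.Str.isIn project (ri.2.getD "Accounts" "")) l
        ((PySem.Dict.ofList (accD.getD acct [])).keys) d) PySem.Dict.empty accD.keys
      = pvRun (fun project ri => PySem.Str.isIn project (ri.2.getD "Accounts" "")) l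
        (accD.keys.flatMap (fun account => (PySem.Dict.ofList (accD.getD account [])).keys)) PySem.Dict.empty := by
    simp only [pvRun]
    exact pv_foldl_flatMap _ _ _ _
  rw [hflat]
  rw [pv_run_dedup _ l hnd _ _ (pv_good_empty _ _)]
  rw [pv_run_eq_B _ l hnd _ _ (pv_good_empty _ _) (fun p _ => PySem.Dict.contains_empty p) (pv_nodup_dedup _)]
  have hPs : List.foldl (fun ps account =>
        List.foldl (fun ps project => if ps.contains project = true then ps else ps ++ [project]) ps
          (PySem.Dict.ofList (accD.getD account [])).keys) [] accD.keys
      = pvDedup (accD.keys.flatMap (fun account => (PySem.Dict.ofList (accD.getD account [])).keys)) := by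
    rw [pv_foldl_flatMap]
    rw [pv_seen_eq_dedup _ []]
    simp
  rw [hPs]
  rfl

theorem pv_seen_nodup (accD : PySem.Dict String (List (String × String))) :
    (pvSeen accD).Nodup := by
  unfold pvSeen
  have hPs : List.foldl (fun ps account =>
        List.foldl (fun ps project => if ps.contains project = true then ps else ps ++ [project]) ps
          (PySem.Dict.ofList (accD.getD account [])).keys) [] accD.keys
      = pvDedup (accD.keys.flatMap (fun account => (PySem.Dict.ofList (accD.getD account [])).keys)) := by
    rw [pv_foldl_flatMap]
    rw [pv_seen_eq_dedup _ []]
    simp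
  rw [hPs]
  exact pv_nodup_dedup _

-- B's positive branch, reduced to the two pvBRun folds (same targets as pv_main_pos)
theorem pv_alt_pos (l : List (String × PvInfo))
    (accD : PySem.Dict String (List (String × String))) (hks : accD.keys.Nodup) :
    [("Account",
        List.map (fun kv2 => (kv2.1, List.map (fun kv3 => (kv3.1, kv3.2.items)) kv2.2.items))
          (pvEmit ((List.foldl (fun bp ri =>
              (pvUpdF pvCU accD.keys bp.1 ri, pvUpdF pvCP (pvSeen accD) bp.2 ri))
            (pvInitB accD.keys, pvInitB (pvSeen accD)) l).1)).items),
      ("Project",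
        List.map (fun kv2 => (kv2.1, List.map (fun kv3 => (kv3.1, kv3.2.items)) kv2.2.items))
          (pvEmit ((List.foldl (fun bp ri =>
              (pvUpdF pvCU accD.keys bp.1 ri, pvUpdF pvCP (pvSeen accD) bp.2 ri))
            (pvInitB accD.keys, pvInitB (pvSeen accD)) l).2)).items)]
    = [("Account",
          List.map (fun kv2 => (kv2.1, List.map (fun kv3 => (kv3.1, kv3.2.items)) kv2.2.items))
            (pvBRun pvCU l accD.keys PySem.Dict.empty).items),
       ("Project",
          List.map (fun kv2 => (kv2.1, List.map (fun kv3 => (kv3.1, kv3.2.items)) kv2.2.items))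
            (pvBRun pvCP l (pvSeen accD) PySem.Dict.empty).items)] := by
  rw [pv_prod_fold l (pvUpdF pvCU accD.keys) (pvUpdF pvCP (pvSeen accD))
      (pvInitB accD.keys) (pvInitB (pvSeen accD))]
  rw [pv_buckets_run pvCU l accD.keys hks,
      pv_buckets_run pvCP l (pvSeen accD) (pv_seen_nodup accD)]

-- ===== VERDICT (by name: the statement is the Claim_ definition above) =====
set_option maxHeartbeats 4000000 in
theorem juwels_jureca_reservation_spec : Claim_equal_juwels_jureca_reservation := by
  intro name s data _ _
  show juwels_jureca_reservation name s data = juwels_jureca_reservation_alt name s data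
  unfold juwels_jureca_reservation juwels_jureca_reservation_alt
  dsimp only
  rw [pv_parse_eq s]
  set dicv := List.foldl (fun dic block =>
      dic.insert (PySem.List.pyGetD (PySem.Str.split₀ (PySem.Str.replace block "\n" " ")) 0 "")
        (List.foldl (fun m kv => m.insert (PySem.List.pyGetD kv 0 "") (PySem.List.pyGetD kv 1 "")) PySem.Dict.empty
          (List.map (fun p => (PySem.Str.split? p "=").getD [])
            (PySem.List.slice (PySem.Str.split₀ (PySem.Str.replace block "\n" " ")) (some 1) none))))
      PySem.Dict.empty (PySem.List.slice ((PySem.Str.split? s "ReservationName=").getD []) (some 1) none) with hdic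
  by_cases hname : (PySem.Dict.ofList data).contains (PySem.Str.upper name) = true
  · rw [if_pos hname,
        if_neg (by simp [hname] : ¬ ((PySem.Dict.ofList data).contains (PySem.Str.upper name) = false))]
    rw [show (PySem.Dict.empty.insert "Account" (PySem.Dict.empty : PvOut)).insert "Project" PySem.Dict.empty
        = PySem.Dict.mk [("Account", (PySem.Dict.empty : PvOut)), ("Project", PySem.Dict.empty)] from rfl]
    have hnd : (dicv.items.map Prod.fst).Nodup := by
      rw [hdic]
      exact PySem.Dict.nodup_keys_foldl_insert_key _ _ _ _ PySem.Dict.nodup_keys_empty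
    exact Eq.trans
      (pv_main_pos dicv.items hnd
        (PySem.Dict.ofList (((PySem.Dict.ofList data).get? (PySem.Str.upper name)).getD []))
        (PySem.Dict.nodup_keys_ofList _))
      (pv_alt_pos dicv.items
        (PySem.Dict.ofList (((PySem.Dict.ofList data).get? (PySem.Str.upper name)).getD []))
        (PySem.Dict.nodup_keys_ofList _)).symm
  · rw [if_neg hname, if_pos (by simpa using hname)]
    rfl
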